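-- pv_equiv track=rewrite | github.com/nguyen-ngocduong/Python | CON4/CON4-Bai8.py | ham13
-- ===== SOURCE A (Python) =====
-- def ham13(n) :
--     m = n
--     dem = 0
--     while n != 0:
--         dem +=1
--         n //= 10
--     tong = 0
--     while m != 0:
--         tong += pow(m%10, dem)
--         m //=10
--     return tong
-- ===== SOURCE B (Python) =====
-- def ham13(n):
--     cnt = [0] * 10
--     k = 0
--     while n != 0:
--         cnt[n % 10] += 1
--         n //= 10
--         k += 1
--     return sum(c * d ** k for d, c in enumerate(cnt))
-- ===== Notes on version B (the rewrite author's own statement) =====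
-- stated objective: alternative
-- what changed: B replaces A's two digit scans (count, then re-extract each digit and raise it) by one pass that fills a fixed ten-slot digit histogram plus the length, and a final sum over the ten digit values weighted by their counts.
import Mathlib
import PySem

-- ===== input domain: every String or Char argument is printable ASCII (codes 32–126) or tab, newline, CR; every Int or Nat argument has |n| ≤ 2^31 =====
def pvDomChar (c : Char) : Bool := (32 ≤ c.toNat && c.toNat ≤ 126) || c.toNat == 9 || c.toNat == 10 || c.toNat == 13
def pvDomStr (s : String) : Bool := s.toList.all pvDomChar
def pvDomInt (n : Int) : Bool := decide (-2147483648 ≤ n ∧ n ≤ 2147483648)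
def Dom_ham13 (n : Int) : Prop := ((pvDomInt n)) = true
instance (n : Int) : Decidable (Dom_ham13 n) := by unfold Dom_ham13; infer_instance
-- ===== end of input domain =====

-- B replaces A's two digit scans by one pass filling a ten-slot digit histogram, then sums count*d^k over the ten digit values; objective: alternative.


-- termination measure for every 'n //= 10' loop below (cited by name in each decreasing_by)
theorem pvDivTenDec (n : Int) (h : ¬ n ≤ 0) : (PySem.Int.floordiv n 10).toNat < n.toNat := by
  have := PySem.Int.floordiv_eq_ediv_of_pos (a := n) (b := 10) (by omega)
  rw [this]; omega

-- ===== PORT A =====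
-- first while loop: count digits ('n ≤ 0' is a totality guard; on n < 0 the Python loops forever)
def ham13CountA (n : Int) : Int :=
  if h : n ≤ 0 then 0
  else 1 + ham13CountA (PySem.Int.floordiv n 10)
termination_by n.toNat
decreasing_by exact pvDivTenDec _ h

-- second while loop: sum of (m % 10) ^ dem
def ham13SumA (m dem : Int) : Int :=
  if h : m ≤ 0 then 0
  else (PySem.Int.mod m 10) ^ dem.toNat + ham13SumA (PySem.Int.floordiv m 10) dem
termination_by m.toNat
decreasing_by exact pvDivTenDec _ h

def ham13 (n : Int) : Int := ham13SumA n (ham13CountA n)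

-- ===== PORT B =====
-- while loop of Source B: state (cnt, k); 'cnt[n % 10] += 1' is List.modify at index n % 10,
-- which is nonnegative and below ten (mod with positive divisor), so the .toNat conversion is exact here
def ham13LoopB (n : Int) (cnt : List Int) (k : Int) : List Int × Int :=
  if h : n ≤ 0 then (cnt, k)
  else ham13LoopB (PySem.Int.floordiv n 10) (cnt.modify (PySem.Int.mod n 10).toNat (· + 1)) (k + 1)
termination_by n.toNat
decreasing_by exact pvDivTenDec _ h

def ham13_alt (n : Int) : Int :=
  let r := ham13LoopB n (List.replicate 10 0) 0
  ((PySem.List.enumerate r.1).map (fun p => p.2 * p.1 ^ r.2.toNat)).sum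

-- ===== PRECONDITION & SPEC =====
-- (no Pre_: the ports agree on every Int; on n < 0 both Pythons loop forever, outside what the claim can speak about)
def Spec_ham13 (n : Int) (out : Int) : Prop := out = ham13_alt n
instance (n : Int) (out : Int) : Decidable (Spec_ham13 n out) := by unfold Spec_ham13; infer_instance

-- ===== CLAIM (what is proved, stated in full; the proofs are below) =====
def Claim_equal_ham13 : Prop := ∀ (n : Int), Dom_ham13 n → Spec_ham13 n (ham13 n)

-- ===== LEMMAS AND PROOFS =====

-- the digit list (least-significant first), shared characterisation of both loops
def pvDigits (n : Int) : List Int :=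
  if h : n ≤ 0 then []
  else PySem.Int.mod n 10 :: pvDigits (PySem.Int.floordiv n 10)
termination_by n.toNat
decreasing_by exact pvDivTenDec _ h

theorem pvDigits_bounds (n : Int) : ∀ d ∈ pvDigits n, 0 ≤ d ∧ d < 10 := by
  induction n using pvDigits.induct with
  | case1 n h => rw [pvDigits]; simp [h]
  | case2 n h ih =>
    rw [pvDigits]
    simp only [h, dite_false, List.mem_cons]
    rintro d (rfl | hd)
    · rw [PySem.Int.mod_eq_emod_of_pos (by omega)]
      exact ⟨Int.emod_nonneg n (by omega), Int.emod_lt_of_pos n (by omega)⟩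
    · exact ih d hd

theorem ham13Count_eq_length (n : Int) : ham13CountA n = ((pvDigits n).length : Int) := by
  induction n using pvDigits.induct with
  | case1 n h => rw [ham13CountA, pvDigits]; simp [h]
  | case2 n h ih =>
    rw [ham13CountA, pvDigits]
    rw [PySem.Int.floordiv_eq_ediv_of_pos (by omega)] at ih
    simp [h, ih]
    omega

theorem ham13Sum_eq_sum (m k : Int) :
    ham13SumA m k = ((pvDigits m).map (fun d => d ^ k.toNat)).sum := by
  induction m using pvDigits.induct with
  | case1 m h => rw [ham13SumA, pvDigits]; simp [h]
  | case2 m h ih =>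
    rw [ham13SumA, pvDigits]
    rw [PySem.Int.floordiv_eq_ediv_of_pos (by omega)] at ih
    simp [h, ih]

-- B's loop = fold of the modify step over the digit list, with the count added to k
theorem ham13LoopB_eq (n : Int) :
    ∀ (cnt : List Int) (k : Int),
      ham13LoopB n cnt k
        = ((pvDigits n).foldl (fun c d => c.modify d.toNat (· + 1)) cnt,
           k + ((pvDigits n).length : Int)) := by
  induction n using pvDigits.induct with
  | case1 n h => intro cnt k; rw [ham13LoopB, pvDigits]; simp [h]
  | case2 n h ih =>
    intro cnt k
    rw [ham13LoopB, pvDigits]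
    simp only [h, dite_false, List.foldl_cons, List.length_cons, ih]
    simp only [Prod.mk.injEq]
    exact ⟨trivial, by push_cast; omega⟩

-- weighted-histogram sum: incrementing slot j adds f (s + j)
theorem enumSum_modify (f : Int → Int) (l : List Int) :
    ∀ (s : Int) (j : Nat), j < l.length →
      ((PySem.List.enumerate (l.modify j (· + 1)) s).map (fun p => p.2 * f p.1)).sum
        = ((PySem.List.enumerate l s).map (fun p => p.2 * f p.1)).sum + f (s + (j : Int)) := by
  induction l with
  | nil => intro s j hj; simp at hj
  | cons x t ih =>
    intro s j hj
    cases j with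
    | zero =>
      simp [PySem.List.enumerate, List.modify_zero_cons]
      ring_nf
    | succ j =>
      simp only [List.modify_succ_cons, PySem.List.enumerate, List.map_cons, List.sum_cons]
      rw [ih (s + 1) j (by simpa using hj)]
      have : (s + 1) + (j : Int) = s + ((j : Nat) + 1 : Nat) := by push_cast; ring
      rw [this, ← add_assoc]

-- folding the increment step over a digit list adds Σ f d to the weighted histogram sum
theorem enumSum_foldl (f : Int → Int) (ds : List Int) :
    ∀ (cnt : List Int), cnt.length = 10 → (∀ d ∈ ds, 0 ≤ d ∧ d < 10) →
      ((PySem.List.enumerate (ds.foldl (fun c d => c.modify d.toNat (· + 1)) cnt)).map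
          (fun p => p.2 * f p.1)).sum
        = ((PySem.List.enumerate cnt).map (fun p => p.2 * f p.1)).sum
            + (ds.map (fun d => f d)).sum := by
  induction ds with
  | nil => intro cnt _ _; simp
  | cons d t ih =>
    intro cnt hlen hb
    have hd := hb d (by simp)
    have hidx : d.toNat < cnt.length := by rw [hlen]; omega
    simp only [List.foldl_cons, List.map_cons, List.sum_cons]
    rw [ih _ (by simp [hlen]) (fun x hx => hb x (by simp [hx]))]
    rw [enumSum_modify f cnt 0 d.toNat hidx]
    have : ((0 : Int) + (d.toNat : Int)) = d := by omega
    rw [this]; ring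

theorem enumSum_replicate_zero (f : Int → Int) :
    ((PySem.List.enumerate (List.replicate 10 (0 : Int))).map (fun p => p.2 * f p.1)).sum = 0 := by
  simp [List.replicate, PySem.List.enumerate]

-- ===== VERDICT (by name: the statement is the Claim_ definition above) =====
theorem ham13_spec : Claim_equal_ham13 := by
  intro n _
  show ham13 n = ham13_alt n
  rw [ham13, ham13_alt]
  rw [ham13LoopB_eq]
  simp only [zero_add]
  rw [enumSum_foldl (fun d => d ^ (((pvDigits n).length : Int)).toNat)
        (pvDigits n) (List.replicate 10 0) (by simp) (pvDigits_bounds n)]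
  rw [enumSum_replicate_zero (fun d => d ^ (((pvDigits n).length : Int)).toNat)]
  rw [ham13Sum_eq_sum, ham13Count_eq_length]
  simp
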